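-- pv_equiv track=rewrite | github.com/likwidoxigen/PythonExercises | AdventOfCode/Day11/seating.py | checkUP2
-- ===== SOURCE A (Python) =====
-- def isOccupied2(arr,x,y):
--     if arr[y][x] == "#":
--         return 1
--     elif arr[y][x] == "L":
--         return 0
--     else:
--         return 5
--
-- def checkUP2(arr,x,y):
--     x = x
--     y = y+1
--     if x < 0 or x > len(arr[0])-1 or y > len(arr)-1 or y < 0:
--         return 0
--     else:
--         test =  isOccupied2(arr,x,y)
--         if test == 5:
--             return checkUP2(arr,x,y)
--         else:
--             return test
-- ===== SOURCE B (Python) =====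
-- def checkUP2(arr, x, y):
--     # One bounds check up front (x and the column count never change), then a
--     # single for-loop over the rows below y instead of A's recursion.
--     if not (0 <= x <= len(arr[0]) - 1) or y + 1 < 0:
--         return 0
--     for row in arr[y + 1:]:
--         cell = row[x]
--         if cell == "#":
--             return 1
--         if cell == "L":
--             return 0
--     return 0
-- ===== Notes on version B (the rewrite author's own statement) =====
-- stated objective: simpler
-- what changed: Replaces A's recursion-with-sentinel-5 helper by a single up-front bounds check on the fixed column x followed by one for-loop over the rows arr[y+1:], where the first '#'/'L' cell decides.
import Mathlib
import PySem

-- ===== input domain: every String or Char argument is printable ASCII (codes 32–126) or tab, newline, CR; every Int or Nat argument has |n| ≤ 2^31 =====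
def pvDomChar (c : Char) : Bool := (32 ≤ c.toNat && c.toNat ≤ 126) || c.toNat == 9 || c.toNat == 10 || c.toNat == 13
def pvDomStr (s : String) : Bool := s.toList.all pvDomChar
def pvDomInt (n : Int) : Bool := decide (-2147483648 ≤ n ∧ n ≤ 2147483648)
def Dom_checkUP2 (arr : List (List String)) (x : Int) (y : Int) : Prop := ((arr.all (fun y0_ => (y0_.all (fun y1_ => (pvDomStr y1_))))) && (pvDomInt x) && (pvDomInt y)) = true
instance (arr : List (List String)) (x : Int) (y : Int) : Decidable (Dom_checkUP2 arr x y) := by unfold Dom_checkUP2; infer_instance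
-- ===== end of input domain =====

-- B replaces A's recursion-plus-sentinel helper by one up-front bounds check and a single
-- loop over the rows below y (objective: simpler; same O(rows) cost).


-- ===== PORT A =====
-- arr[y][x]; the .getD "" default is reached only where Python raises IndexError (outside Pre_)
def isOccupied2 (arr : List (List String)) (x : Int) (y : Int) : Int :=
  let c := ((PySem.List.pyGet? arr y).bind (fun row => PySem.List.pyGet? row x)).getD ""
  if c = "#" then 1 else if c = "L" then 0 else 5

-- len(arr[0]) is arr.headI.length; on arr = [] Python raises there (outside Pre_, except
-- under the short-circuiting x < 0 branch, where headI is never compared against)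
def checkUP2 (arr : List (List String)) (x : Int) (y : Int) : Int :=
  if x < 0 ∨ x > (arr.headI.length : Int) - 1 ∨ y + 1 > (arr.length : Int) - 1 ∨ y + 1 < 0 then 0
  else
    let test := isOccupied2 arr x (y + 1)
    if test = 5 then checkUP2 arr x (y + 1) else test
termination_by ((arr.length : Int) - y).toNat
decreasing_by omega

-- ===== PORT B =====
-- the for-loop over the rows of arr[y+1:]; row[x] via pyGet? (getD "" only where Python raises)
def scanColumn (x : Int) : List (List String) → Int
  | [] => 0
  | row :: rest =>
    let cell := (PySem.List.pyGet? row x).getD ""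
    if cell = "#" then 1 else if cell = "L" then 0 else scanColumn x rest

def checkUP2_alt (arr : List (List String)) (x : Int) (y : Int) : Int :=
  if ¬(0 ≤ x ∧ x ≤ (arr.headI.length : Int) - 1) ∨ y + 1 < 0 then 0
  else scanColumn x (PySem.List.slice arr (some (y + 1)) none)

-- ===== PRECONDITION & SPEC =====
-- a row at which A's upward scan keeps going: column x exists and holds neither '#' nor 'L'
def rowFloorB (x : Int) (row : List String) : Bool :=
  match PySem.List.pyGet? row x with
  | some c => !(c == "#") && !(c == "L")
  | none => false

-- Pre_ excludes EXACTLY the inputs on which A raises IndexError (arr == [] reached with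
-- x ≥ 0; a row shorter than column x actually reached by the upward scan, i.e. preceded
-- only by floor rows); B raises on exactly the same inputs. Everywhere A returns, Pre_ holds.
def Pre_checkUP2 (arr : List (List String)) (x : Int) (y : Int) : Prop :=
  x < 0 ∨ (arr ≠ [] ∧
    ((0 ≤ x ∧ x < (arr.headI.length : Int)) → 0 ≤ y + 1 →
      ∀ i, i < arr.length → y + 1 ≤ (i : Int) →
        (∀ j, j < i → y + 1 ≤ (j : Int) → rowFloorB x arr[j]! = true) →
        x < ((arr[i]!).length : Int)))
instance (arr : List (List String)) (x : Int) (y : Int) : Decidable (Pre_checkUP2 arr x y) := by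
  unfold Pre_checkUP2; infer_instance

def pvWitness_checkUP2 : List (List String) × Int × Int := ([[".", "#"], [".", "L"]], 1, -1)

def Spec_checkUP2 (arr : List (List String)) (x : Int) (y : Int) (out : Int) : Prop := out = checkUP2_alt arr x y
instance (arr : List (List String)) (x : Int) (y : Int) (out : Int) : Decidable (Spec_checkUP2 arr x y out) := by unfold Spec_checkUP2; infer_instance

-- ===== CLAIM (what is proved, stated in full; the proofs are below) =====
def Claim_equal_checkUP2 : Prop := ∀ (arr : List (List String)) (x : Int) (y : Int), Dom_checkUP2 arr x y → Pre_checkUP2 arr x y → Spec_checkUP2 arr x y (checkUP2 arr x y)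

-- ===== LEMMAS AND PROOFS =====

-- main invariant (needs no row-length hypothesis: a missing cell defaults to "",
-- which both ports treat as floor): inside the column bounds, A's recursion
-- computes B's scan of the dropped suffix
lemma checkUP2_eq_scan (arr : List (List String)) (x : Int)
    (hx0 : 0 ≤ x) (hxw : x < (arr.headI.length : Int)) :
    ∀ (n : Nat) (y : Int), 0 ≤ y + 1 → arr.length ≤ (y + 1).toNat + n →
      checkUP2 arr x y = scanColumn x (arr.drop (y + 1).toNat) := by
  intro n
  induction n with
  | zero =>
    intro y hy hn
    rw [checkUP2, if_pos (by omega)]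
    rw [List.drop_eq_nil_of_le (by omega)]
    simp [scanColumn]
  | succ n ih =>
    intro y hy hn
    by_cases hend : arr.length ≤ (y + 1).toNat
    · rw [checkUP2, if_pos (by omega)]
      rw [List.drop_eq_nil_of_le hend]
      simp [scanColumn]
    · have hlt : (y + 1).toNat < arr.length := by omega
      have hget : PySem.List.pyGet? arr (y + 1) = some (arr[(y + 1).toNat]'hlt) := by
        have h2 : y + 1 < (arr.length : Int) := by omega
        simp [PySem.List.pyGet?, PySem.List.pyIdx?, hy, h2]
      have hdrop : arr.drop (y + 1).toNat
          = (arr[(y + 1).toNat]'hlt) :: arr.drop ((y + 1).toNat + 1) :=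
        List.drop_eq_getElem_cons hlt
      rw [checkUP2, if_neg (by omega)]
      rw [hdrop]
      simp only [isOccupied2, scanColumn, hget, Option.bind_some]
      set c := (PySem.List.pyGet? (arr[(y + 1).toNat]'hlt) x).getD "" with hc
      by_cases h1 : c = "#"
      · simp [h1]
      · by_cases h2 : c = "L"
        · simp [h2]
        · simp only [h1, h2, if_false, if_true]
          have := ih (y + 1) (by omega) (by omega)
          rw [this]
          have h3 : (y + 1 + 1).toNat = (y + 1).toNat + 1 := by omega
          rw [h3]

-- ===== VERDICT (by name: the statement is the Claim_ definition above) =====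
theorem checkUP2_spec : Claim_equal_checkUP2 := by
  unfold Claim_equal_checkUP2
  intro arr x y _ _
  unfold Spec_checkUP2 checkUP2_alt
  by_cases hx0 : x < 0
  · rw [checkUP2, if_pos (Or.inl hx0), if_pos (by omega)]
  · by_cases hy : y + 1 < 0
    · rw [checkUP2, if_pos (by omega), if_pos (by omega)]
    · by_cases hxw : x < (arr.headI.length : Int)
      · rw [if_neg (by omega), PySem.List.slice_from arr (show (0:Int) ≤ y + 1 by omega)]
        exact checkUP2_eq_scan arr x (by omega) hxw arr.length y (by omega) (by omega)
      · rw [checkUP2, if_pos (by omega), if_pos (by omega)]
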